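-- pv_equiv track=rewrite | github.com/almala333/EEBE-problemas-Jutge-Q1-24-25 | 03_Iteraciones/X28180_Posición.py | pos_a
-- ===== SOURCE A (Python) =====
-- def pos_a(s, k):
--     '''
--     Paràmetres
--     ----------
--     cadena: str
--         La cadena d'entrada per buscar el caràcter 'a'.
--     ocorrencia: int
--         La k-èsima ocurrencia del caràcter 'a' a buscar.
--
--     Retorna
--     -------
--     int
--         La posició de la k-èsima 'a' a la cadena, o -1 si no existeix.
--
--     Tests públics
--     -------------
--     >>> pos_a('', 1)
--     -1
--     >>> pos_a('hola', 2)
--     -1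
--     >>> pos_a('ara', 3)
--     -1
--     >>> pos_a('lalaland', 3)
--     5
--     >>> pos_a('almendro', 1)
--     0
--
--     Tests privats
--     -------------
--     >>> pos_a('banana', 2)
--     3
--     >>> pos_a('aardvark', 1)
--     0
--     >>> pos_a('hello', 1)
--     -1
--     >>> pos_a('aaaa', 4)
--     3
--     >>> pos_a('abcabc', 2)
--     3
--     '''
--
--     count_a = 0
--     for i in range(len(s)):
--         if s[i] == 'a':
--             count_a += 1
--             if count_a == k:
--                 return i
--     return -1
-- ===== SOURCE B (Python) =====
-- def pos_a(s, k):
--     parts = s.split('a')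
--     if k < 1 or k >= len(parts):
--         return -1
--     return sum(len(p) for p in parts[:k]) + (k - 1)
-- ===== Notes on version B (the rewrite author's own statement) =====
-- stated objective: alternative
-- what changed: Replaces A's per-character counting scan with an early return by splitting the string on 'a' and computing the k-th occurrence's position arithmetically as the sum of the lengths of the first k separator-free pieces plus k-1.
import Mathlib
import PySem

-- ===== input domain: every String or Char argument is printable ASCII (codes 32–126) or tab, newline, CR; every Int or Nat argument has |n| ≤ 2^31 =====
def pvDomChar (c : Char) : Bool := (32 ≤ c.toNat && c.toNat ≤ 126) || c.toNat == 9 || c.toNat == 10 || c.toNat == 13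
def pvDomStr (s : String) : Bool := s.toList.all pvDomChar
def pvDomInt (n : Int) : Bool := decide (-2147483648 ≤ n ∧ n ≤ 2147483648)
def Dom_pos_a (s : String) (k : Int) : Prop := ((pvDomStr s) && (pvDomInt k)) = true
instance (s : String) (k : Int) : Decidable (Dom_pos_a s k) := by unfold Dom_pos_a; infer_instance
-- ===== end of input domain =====

-- B splits the string on 'a' and computes the k-th occurrence's position arithmetically
-- from the lengths of the first k separator-free pieces, instead of A's per-character
-- counting scan with an early return (objective: alternative).


-- ===== PORT A =====
-- the 'for i in range(len(s))' loop with the counter and early return, as structural recursion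
def posALoop : List Char → Int → Int → Int → Int
  | [], _, _, _ => -1
  | c :: rest, i, count, k =>
    if c = 'a' then
      if count + 1 = k then i else posALoop rest (i + 1) (count + 1) k
    else posALoop rest (i + 1) count k

def pos_a (s : String) (k : Int) : Int := posALoop s.toList 0 0 k

-- ===== PORT B =====
-- Source B: parts = s.split('a'); guard; sum(len(p) for p in parts[:k]) + (k - 1)
def pos_a_alt (s : String) (k : Int) : Int :=
  let parts : List String := (PySem.Str.split? s "a").getD []
  if k < 1 ∨ (parts.length : Int) ≤ k then -1
  else ((PySem.List.slice parts none (some k)).map PySem.Str.len).sum + (k - 1)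

-- ===== PRECONDITION & SPEC =====
def Spec_pos_a (s : String) (k : Int) (out : Int) : Prop := out = pos_a_alt s k
instance (s : String) (k : Int) (out : Int) : Decidable (Spec_pos_a s k out) := by unfold Spec_pos_a; infer_instance

-- ===== CLAIM (what is proved, stated in full; the proofs are below) =====
def Claim_equal_pos_a : Prop := ∀ (s : String) (k : Int), Dom_pos_a s k → Spec_pos_a s k (pos_a s k)

-- ===== LEMMAS AND PROOFS =====

-- structural version of s.split('a')
def partsOf : List Char → List (List Char)
  | [] => [[]]
  | c :: r =>
    if c = 'a' then [] :: partsOf r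
    else
      match partsOf r with
      | [] => [[c]]      -- unreachable: partsOf is never []
      | p :: ps => (c :: p) :: ps

lemma partsOf_ne_nil (cs : List Char) : partsOf cs ≠ [] := by
  cases cs with
  | nil => simp [partsOf]
  | cons c r =>
    by_cases h : c = 'a'
    · simp [partsOf, h]
    · simp only [partsOf, h, if_false]
      cases partsOf r <;> simp

-- prepend x onto the head part
def consHead (x : List Char) : List (List Char) → List (List Char)
  | [] => [x]
  | p :: ps => (x ++ p) :: ps

lemma go_step (f : Nat) (c : Char) (rest cur : List Char) (acc : List (List Char)) :
    PySem.Chars.splitOn.go ['a'] (f+1) (c :: rest) cur acc =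
      if c = 'a' then PySem.Chars.splitOn.go ['a'] f rest [] (cur.reverse :: acc)
      else PySem.Chars.splitOn.go ['a'] f rest (c :: cur) acc := by
  rw [PySem.Chars.splitOn.go]
  by_cases h : c = 'a'
  · subst h
    simp only [List.isPrefixOf, if_true]
    simp
  · simp only [List.isPrefixOf]
    rw [if_neg, if_neg h]
    simp [Ne.symm h]

lemma go_eq (cs : List Char) : ∀ (f : Nat) (cur : List Char) (acc : List (List Char)),
    cs.length < f →
    PySem.Chars.splitOn.go ['a'] f cs cur acc = acc.reverse ++ consHead cur.reverse (partsOf cs) := by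
  induction cs with
  | nil =>
    intro f cur acc hf
    cases f with
    | zero => omega
    | succ f =>
      rw [PySem.Chars.splitOn.go]
      simp [partsOf, consHead]
      omega
  | cons c rest ih =>
    intro f cur acc hf
    cases f with
    | zero => omega
    | succ f =>
      have hr : rest.length < f := by simpa using hf
      rw [go_step]
      by_cases h : c = 'a'
      · rw [if_pos h, ih f [] (cur.reverse :: acc) hr]
        obtain ⟨p, ps, hp⟩ : ∃ p ps, partsOf rest = p :: ps := by
          cases hq : partsOf rest with
          | nil => exact absurd hq (partsOf_ne_nil rest)
          | cons p ps => exact ⟨p, ps, rfl⟩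
        simp [partsOf, h, hp, consHead]
      · rw [if_neg h, ih f (c :: cur) acc hr]
        obtain ⟨p, ps, hp⟩ : ∃ p ps, partsOf rest = p :: ps := by
          cases hq : partsOf rest with
          | nil => exact absurd hq (partsOf_ne_nil rest)
          | cons p ps => exact ⟨p, ps, rfl⟩
        simp [partsOf, h, hp, consHead]

lemma splitOn_eq_partsOf (cs : List Char) :
    PySem.Chars.splitOn cs ['a'] = partsOf cs := by
  have := go_eq cs (cs.length + 1) [] [] (by omega)
  rw [PySem.Chars.splitOn] at *
  obtain ⟨p, ps, hp⟩ : ∃ p ps, partsOf cs = p :: ps := by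
    cases hq : partsOf cs with
    | nil => exact absurd hq (partsOf_ne_nil cs)
    | cons p ps => exact ⟨p, ps, rfl⟩
  simpa [consHead, hp] using this

-- sum of the lengths of the first t parts
def sumLen (ps : List (List Char)) (t : Nat) : Int :=
  ((ps.take t).map (fun p => (p.length : Int))).sum

-- A's loop, characterised by B's split arithmetic
lemma loop_eq (cs : List Char) : ∀ (n count k : Int),
    posALoop cs n count k =
      if 1 ≤ k - count ∧ k - count < ((partsOf cs).length : Int) then
        n + sumLen (partsOf cs) (k - count).toNat + (k - count - 1)
      else -1 := by
  induction cs with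
  | nil =>
    intro n count k
    simp only [posALoop, partsOf]
    rw [if_neg]; simp
  | cons c rest ih =>
    intro n count k
    by_cases h : c = 'a'
    · by_cases hk : count + 1 = k
      · have hm : k - count = 1 := by omega
        have hlen : (1:Int) < (([] :: partsOf rest).length : Int) := by
          have := partsOf_ne_nil rest
          cases hq : partsOf rest with
          | nil => exact absurd hq this
          | cons p ps => simp
        simp only [posALoop, h, if_true, hk, partsOf]
        rw [if_pos ⟨by omega, by omega⟩]
        simp [sumLen, hm]
      · simp only [posALoop, h, if_true, if_neg hk, partsOf]
        rw [ih (n + 1) (count + 1) k]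
        by_cases hg : 1 ≤ k - (count + 1) ∧ k - (count + 1) < ((partsOf rest).length : Int)
        · rw [if_pos hg, if_pos (by simp; omega)]
          have ht : (k - count).toNat = (k - (count + 1)).toNat + 1 := by omega
          rw [ht]
          simp only [sumLen, List.take_succ_cons, List.map_cons, List.sum_cons]
          simp
          ring
        · rw [if_neg hg, if_neg]
          intro ⟨h1, h2⟩
          apply hg
          constructor
          · omega
          · simp at h2; omega
    · simp only [posALoop, h, if_false, partsOf]
      rw [ih (n + 1) count k]
      obtain ⟨p, ps, hp⟩ : ∃ p ps, partsOf rest = p :: ps := by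
        cases hq : partsOf rest with
        | nil => exact absurd hq (partsOf_ne_nil rest)
        | cons p ps => exact ⟨p, ps, rfl⟩
      rw [hp]
      by_cases hg : 1 ≤ k - count ∧ k - count < ((p :: ps).length : Int)
      · rw [if_pos hg, if_pos (by simpa using hg)]
        have ht : (k - count).toNat = ((k - count).toNat - 1) + 1 := by omega
        rw [ht]
        simp only [sumLen, List.take_succ_cons, List.map_cons, List.sum_cons]
        push_cast [List.length_cons]
        ring
      · rw [if_neg hg, if_neg (by simpa using hg)]

lemma split?_getD (s : String) :
    ((PySem.Str.split? s "a").getD []).map String.toList = partsOf s.toList := by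
  have h := PySem.Str.split?_map s "a"
  rw [show ("a" : String).toList = ['a'] from rfl] at h
  rw [PySem.Chars.split?] at h
  simp only [List.isEmpty_cons, if_false, Bool.false_eq_true] at h
  cases hq : PySem.Str.split? s "a" with
  | none => rw [hq] at h; simp at h
  | some parts =>
    rw [hq] at h
    simp only [Option.map_some, Option.some.injEq] at h
    simp only [Option.getD_some]
    rw [h, splitOn_eq_partsOf]

-- ===== VERDICT (by name: the statement is the Claim_ definition above) =====
theorem pos_a_spec : Claim_equal_pos_a := by
  intro s k _
  show pos_a s k = pos_a_alt s k
  unfold pos_a pos_a_alt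
  have hmap := split?_getD s
  set parts := (PySem.Str.split? s "a").getD [] with hparts
  have hlen : parts.length = (partsOf s.toList).length := by
    rw [← hmap, List.length_map]
  rw [loop_eq]
  simp only [Int.sub_zero]
  by_cases hg : 1 ≤ k ∧ k < ((partsOf s.toList).length : Int)
  · rw [if_pos hg, if_neg (by push Not; constructor <;> [omega; (rw [hlen]; omega)])]
    have hk0 : (0:Int) ≤ k := by omega
    rw [PySem.List.slice_to _ hk0]
    have : (parts.take k.toNat).map PySem.Str.len
        = ((partsOf s.toList).take k.toNat).map (fun p => (p.length : Int)) := by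
      rw [← hmap, List.map_take, List.map_take, List.map_map]
      rfl
    rw [this]
    simp only [sumLen]
    omega
  · rw [if_neg hg, if_pos]
    by_cases h1 : k < 1
    · exact Or.inl h1
    · right; rw [hlen]; omega
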